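-- pv_equiv track=rewrite | github.com/gHashTag/vibee-lang | research/trinity_compression.py | ternary_huffman
-- ===== SOURCE A (Python) =====
-- class TernaryHuffmanNode:
--     def __init__(self, char=None, freq=0):
--         self.char = char
--         self.freq = freq
--         self.children = [None, None, None]  # 3 children!
--
-- def ternary_huffman(frequencies: dict) -> dict:
--     """
--     Build ternary Huffman tree (3 children per node)
--     Returns encoding dictionary
--     """
--     # Need (n-1) % 2 == 0 for complete ternary tree
--     # Add dummy nodes if needed
--     nodes = [TernaryHuffmanNode(char, freq) for char, freq in frequencies.items()]
--
--     # Pad to make (n-1) divisible by 2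
--     while (len(nodes) - 1) % 2 != 0:
--         nodes.append(TernaryHuffmanNode(None, 0))
--
--     import heapq
--     heap = [(node.freq, i, node) for i, node in enumerate(nodes)]
--     heapq.heapify(heap)
--
--     counter = len(nodes)
--
--     while len(heap) > 1:
--         # Take 3 smallest (or 2 if only 2 left)
--         children = []
--         for _ in range(min(3, len(heap))):
--             if heap:
--                 children.append(heapq.heappop(heap))
--
--         if len(children) < 2:
--             break
--
--         # Create parent
--         parent = TernaryHuffmanNode()
--         parent.freq = sum(c[0] for c in children)
--         for i, (_, _, child) in enumerate(children):
--             parent.children[i] = child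
--
--         heapq.heappush(heap, (parent.freq, counter, parent))
--         counter += 1
--
--     # Build codes
--     codes = {}
--
--     def build_codes(node, code=""):
--         if node is None:
--             return
--         if node.char is not None:
--             codes[node.char] = code if code else "0"
--             return
--         for i, child in enumerate(node.children):
--             if child is not None:
--                 build_codes(child, code + str(i))
--
--     if heap:
--         build_codes(heap[0][2])
--
--     return codes
-- ===== SOURCE B (Python) =====
-- import heapq
--
-- def ternary_huffman(frequencies: dict) -> dict:
--     """
--     Build the ternary Huffman encoding without materialising a tree:
--     each heap entry carries the partial code list of every char under it.
--     """
--     entries = [(freq, i, [(char, "")]) for i, (char, freq) in enumerate(frequencies.items())]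
--     # pad so (n - 1) is even (one dummy entry with no chars suffices)
--     if (len(entries) - 1) % 2 != 0:
--         entries.append((0, len(entries), []))
--     heapq.heapify(entries)
--
--     counter = len(entries)
--     while len(entries) > 1:
--         children = [heapq.heappop(entries) for _ in range(min(3, len(entries)))]
--         merged = [(char, str(i) + code)
--                   for i, (_, _, pairs) in enumerate(children)
--                   for char, code in pairs]
--         heapq.heappush(entries, (sum(f for f, _, _ in children), counter, merged))
--         counter += 1
--
--     final = entries[0][2]
--     return {char: (code if code else "0") for char, code in final}
-- ===== Notes on version B (the rewrite author's own statement) =====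
-- stated objective: alternative
-- what changed: B never builds the ternary tree: each heap entry carries the list of (char, partial code) pairs beneath it, a merge prepends the child digit to each code, so the recursive build_codes tree walk disappears and the final dict is read off the surviving entry.
import Mathlib
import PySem

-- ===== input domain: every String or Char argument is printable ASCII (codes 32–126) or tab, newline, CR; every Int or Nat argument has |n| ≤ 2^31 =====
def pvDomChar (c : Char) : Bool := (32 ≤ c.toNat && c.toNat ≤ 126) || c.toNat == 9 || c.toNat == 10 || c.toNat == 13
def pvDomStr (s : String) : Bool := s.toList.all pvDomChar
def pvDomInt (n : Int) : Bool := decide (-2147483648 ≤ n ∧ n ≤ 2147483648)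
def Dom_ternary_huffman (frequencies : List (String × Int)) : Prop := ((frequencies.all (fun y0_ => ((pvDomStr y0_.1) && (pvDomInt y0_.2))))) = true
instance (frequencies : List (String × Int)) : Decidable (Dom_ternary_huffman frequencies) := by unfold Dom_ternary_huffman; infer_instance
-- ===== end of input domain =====

-- B replaces A's explicit ternary tree + recursive code-walk by heap entries that carry each
-- char's partial code directly (alternative decomposition, same cost).

-- ===== PORT A =====
-- Shared helper: Python's heapq (heapify / heappush / heappop), transliterated from CPython's
-- heapq.py on lists of entries (freq, counter, payload).  Entries are compared lexicographically
-- on (freq, counter) only: on every heap either Python builds, the counter components are pairwise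
-- distinct, so Python's tuple comparison never reaches the third component — this comparison is
-- exact there.  The `none` fallbacks on out-of-range indexing are unreachable (heapq never
-- indexes out of range; the guards only make the functions total).
def hpLt {α : Type} (a b : Int × Int × α) : Bool :=
  a.1 < b.1 || (a.1 == b.1 && a.2.1 < b.2.1)

-- heapq._siftdown's while loop; newitem is the element being placed; fuel ≥ pos suffices
-- (pos strictly decreases).
def hpSiftdownLoop {α : Type} (startpos : Nat) (newitem : Int × Int × α) :
    Nat → Nat → List (Int × Int × α) → List (Int × Int × α)
  | 0, pos, heap => heap.set pos newitem
  | fuel + 1, pos, heap =>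
    if startpos < pos then
      match heap[(pos - 1) / 2]? with
      | some parent =>
        if hpLt newitem parent then
          hpSiftdownLoop startpos newitem fuel ((pos - 1) / 2) (heap.set pos parent)
        else heap.set pos newitem
      | none => heap.set pos newitem
    else heap.set pos newitem

def hpSiftdown {α : Type} (heap : List (Int × Int × α)) (startpos pos : Nat) :
    List (Int × Int × α) :=
  match heap[pos]? with
  | some newitem => hpSiftdownLoop startpos newitem pos pos heap
  | none => heap

-- heapq._siftup's while loop; fuel ≥ endpos suffices (pos strictly increases below endpos).
def hpSiftupLoop {α : Type} (endpos startpos : Nat) (newitem : Int × Int × α) :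
    Nat → Nat → List (Int × Int × α) → List (Int × Int × α)
  | 0, pos, heap => hpSiftdown (heap.set pos newitem) startpos pos
  | fuel + 1, pos, heap =>
    if 2 * pos + 1 < endpos then
      match heap[2 * pos + 1]? with
      | some c =>
        -- pick the smaller child, preferring the right one on a (never occurring) tie
        let rc : Nat × (Int × Int × α) :=
          if 2 * pos + 2 < endpos then
            match heap[2 * pos + 2]? with
            | some r => if !(hpLt c r) then (2 * pos + 2, r) else (2 * pos + 1, c)
            | none => (2 * pos + 1, c)
          else (2 * pos + 1, c)
        hpSiftupLoop endpos startpos newitem fuel rc.1 (heap.set pos rc.2)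
      | none => heap
    else hpSiftdown (heap.set pos newitem) startpos pos

def hpSiftup {α : Type} (heap : List (Int × Int × α)) (pos : Nat) : List (Int × Int × α) :=
  match heap[pos]? with
  | some newitem => hpSiftupLoop heap.length pos newitem heap.length pos heap
  | none => heap

-- heapify: for i in reversed(range(n // 2)): _siftup(x, i)
def hpHeapifyLoop {α : Type} : Nat → List (Int × Int × α) → List (Int × Int × α)
  | 0, heap => heap
  | i + 1, heap => hpHeapifyLoop i (hpSiftup heap i)

def hpHeapify {α : Type} (heap : List (Int × Int × α)) : List (Int × Int × α) :=
  hpHeapifyLoop (heap.length / 2) heap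

def hpPush {α : Type} (heap : List (Int × Int × α)) (item : Int × Int × α) :
    List (Int × Int × α) :=
  hpSiftdown (heap ++ [item]) 0 heap.length

def hpPop {α : Type} (heap : List (Int × Int × α)) :
    Option ((Int × Int × α) × List (Int × Int × α)) :=
  match heap.getLast? with
  | none => none                                   -- pop from empty list: IndexError (unreachable)
  | some lastelt =>
    match heap.dropLast with
    | [] => some (lastelt, [])
    | r0 :: rest => some (r0, hpSiftup ((r0 :: rest).set 0 lastelt) 0)

-- A's TernaryHuffmanNode: char (None for a dummy) + freq, or a parent with 2 or 3 non-None
-- children (A's parents always receive exactly 2 or 3 children; the remaining slots stay None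
-- and build_codes skips them).
inductive TNode : Type
  | leaf : Option String → Int → TNode
  | node2 : Int → TNode → TNode → TNode
  | node3 : Int → TNode → TNode → TNode → TNode
deriving DecidableEq, Repr

def tnFreq : TNode → Int
  | .leaf _ f => f
  | .node2 f _ _ => f
  | .node3 f _ _ _ => f

-- A's merge while-loop; fuel ≥ heap.length suffices (each iteration shortens the heap).
-- Inside the loop len(heap) ≥ 2, so min(3, len(heap)) ∈ {2, 3}, every `if heap:` guard holds and
-- `if len(children) < 2: break` never fires.
def hAMerge : Nat → Int → List (Int × Int × TNode) → List (Int × Int × TNode)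
  | 0, _, heap => heap
  | fuel + 1, counter, heap =>
    if heap.length > 1 then
      match hpPop heap with
      | none => heap
      | some (c0, h1) =>
        match hpPop h1 with
        | none => h1
        | some (c1, h2) =>
          if 3 ≤ heap.length then
            match hpPop h2 with
            | none => h2
            | some (c2, h3) =>
              hAMerge fuel (counter + 1)
                (hpPush h3 (c0.1 + c1.1 + c2.1, counter,
                  TNode.node3 (c0.1 + c1.1 + c2.1) c0.2.2 c1.2.2 c2.2.2))
          else
            hAMerge fuel (counter + 1)
              (hpPush h2 (c0.1 + c1.1, counter, TNode.node2 (c0.1 + c1.1) c0.2.2 c1.2.2))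
    else heap

-- build_codes; the growing code string is kept as List Char (exact: it holds only ASCII digits),
-- turned into a String at the single point where Python stores it in the codes dict.
def buildCodes : PySem.Dict String String → TNode → List Char → PySem.Dict String String
  | codes, .leaf oc _, code =>
    match oc with
    | some c => codes.insert c (String.ofList (if code = [] then ['0'] else code))
    | none => codes
  | codes, .node2 _ a b, code =>
      buildCodes (buildCodes codes a (code ++ ['0'])) b (code ++ ['1'])
  | codes, .node3 _ a b c, code =>
      buildCodes (buildCodes (buildCodes codes a (code ++ ['0'])) b (code ++ ['1'])) c
        (code ++ ['2'])

-- the final `if heap: build_codes(heap[0][2])` step of A ([] = `if heap:` false, codes stays {})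
def aFinish : List (Int × Int × TNode) → List (String × String)
  | [] => []
  | e :: _ => (buildCodes PySem.Dict.empty e.2.2 []).items

def ternary_huffman (frequencies : List (String × Int)) : List (String × String) :=
  let nodes0 := frequencies.map (fun cf => TNode.leaf (some cf.1) cf.2)
  -- Python's padding while-loop body runs at most once: one append makes (len - 1) even
  let nodes := if PySem.Int.mod ((nodes0.length : Int) - 1) 2 != 0
               then nodes0 ++ [TNode.leaf none 0] else nodes0
  let heap0 := hpHeapify ((PySem.List.enumerate nodes).map (fun p => (tnFreq p.2, p.1, p.2)))
  aFinish (hAMerge heap0.length (nodes.length : Int) heap0)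

-- ===== PORT B =====
-- B's merge while-loop: identical heap discipline, but the payload is the list of
-- (char, partial code) pairs under that entry; a merge prepends the child's digit to every code.
def hBMerge : Nat → Int → List (Int × Int × List (String × List Char)) →
    List (Int × Int × List (String × List Char))
  | 0, _, entries => entries
  | fuel + 1, counter, entries =>
    if entries.length > 1 then
      match hpPop entries with
      | none => entries
      | some (c0, h1) =>
        match hpPop h1 with
        | none => h1
        | some (c1, h2) =>
          if 3 ≤ entries.length then
            match hpPop h2 with
            | none => h2
            | some (c2, h3) =>
              hBMerge fuel (counter + 1)
                (hpPush h3 (c0.1 + c1.1 + c2.1, counter,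
                  c0.2.2.map (fun p => (p.1, '0' :: p.2)) ++
                  c1.2.2.map (fun p => (p.1, '1' :: p.2)) ++
                  c2.2.2.map (fun p => (p.1, '2' :: p.2))))
          else
            hBMerge fuel (counter + 1)
              (hpPush h2 (c0.1 + c1.1, counter,
                c0.2.2.map (fun p => (p.1, '0' :: p.2)) ++
                c1.2.2.map (fun p => (p.1, '1' :: p.2))))
    else entries

-- B's final dict comprehension over the surviving entry's pairs ([] = the unreachable empty heap)
def bFinish : List (Int × Int × List (String × List Char)) → List (String × String)
  | [] => []
  | e :: _ =>
    (e.2.2.foldl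
      (fun d p => d.insert p.1 (String.ofList (if p.2 = [] then ['0'] else p.2)))
      PySem.Dict.empty).items

def ternary_huffman_alt (frequencies : List (String × Int)) : List (String × String) :=
  let entries0 := (PySem.List.enumerate frequencies).map
    (fun p => (p.2.2, p.1, [(p.2.1, ([] : List Char))]))
  let entries1 := if PySem.Int.mod ((entries0.length : Int) - 1) 2 != 0
                  then entries0 ++ [(0, (entries0.length : Int), [])] else entries0
  bFinish (hBMerge entries1.length (entries1.length : Int) (hpHeapify entries1))

-- ===== PRECONDITION & SPEC =====
def Spec_ternary_huffman (frequencies : List (String × Int)) (out : List (String × String)) : Prop := out = ternary_huffman_alt frequencies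
instance (frequencies : List (String × Int)) (out : List (String × String)) : Decidable (Spec_ternary_huffman frequencies out) := by unfold Spec_ternary_huffman; infer_instance

-- ===== CLAIM (what is proved, stated in full; the proofs are below) =====
def Claim_equal_ternary_huffman : Prop := ∀ (frequencies : List (String × Int)), Dom_ternary_huffman frequencies → Spec_ternary_huffman frequencies (ternary_huffman frequencies)

-- ===== LEMMAS AND PROOFS =====

-- the list of (char, raw code) pairs that build_codes emits below a node, with "" prefix
def rawEntries : TNode → List (String × List Char)
  | .leaf (some c) _ => [(c, [])]
  | .leaf none _ => []
  | .node2 _ a b =>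
      (rawEntries a).map (fun p => (p.1, '0' :: p.2)) ++
      (rawEntries b).map (fun p => (p.1, '1' :: p.2))
  | .node3 _ a b c =>
      (rawEntries a).map (fun p => (p.1, '0' :: p.2)) ++
      (rawEntries b).map (fun p => (p.1, '1' :: p.2)) ++
      (rawEntries c).map (fun p => (p.1, '2' :: p.2))

-- relating the two heap payloads
def emap {α β : Type} (g : α → β) (e : Int × Int × α) : Int × Int × β :=
  (e.1, e.2.1, g e.2.2)

theorem hpSiftdownLoop_map {α β : Type} (g : α → β) (startpos : Nat) (ni : Int × Int × α) :
    ∀ (fuel pos : Nat) (heap : List (Int × Int × α)),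
      hpSiftdownLoop startpos (emap g ni) fuel pos (heap.map (emap g)) =
        (hpSiftdownLoop startpos ni fuel pos heap).map (emap g) := by
  intro fuel
  induction fuel with
  | zero => intro pos heap; simp [hpSiftdownLoop, List.map_set]
  | succ n ih =>
    intro pos heap
    by_cases hsp : startpos < pos
    · simp only [hpSiftdownLoop, hsp, if_true, List.getElem?_map]
      cases h : heap[(pos - 1) / 2]? with
      | none => simp
      | some parent =>
        simp only [Option.map_some]
        have hlt : hpLt (emap g ni) (emap g parent) = hpLt ni parent := rfl
        by_cases h2 : hpLt ni parent
        · simp [hlt, h2, ← List.map_set, ih]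
        · simp [hlt, h2, List.map_set]
    · simp [hpSiftdownLoop, hsp]

theorem hpSiftdown_map {α β : Type} (g : α → β) (heap : List (Int × Int × α))
    (startpos pos : Nat) :
    hpSiftdown (heap.map (emap g)) startpos pos = (hpSiftdown heap startpos pos).map (emap g) := by
  simp only [hpSiftdown, List.getElem?_map]
  cases h : heap[pos]? with
  | none => simp
  | some ni => simp [hpSiftdownLoop_map]

theorem hpSiftupLoop_map {α β : Type} (g : α → β) (endpos startpos : Nat) (ni : Int × Int × α) :
    ∀ (fuel pos : Nat) (heap : List (Int × Int × α)),
      hpSiftupLoop endpos startpos (emap g ni) fuel pos (heap.map (emap g)) =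
        (hpSiftupLoop endpos startpos ni fuel pos heap).map (emap g) := by
  intro fuel
  induction fuel with
  | zero => intro pos heap; simp [hpSiftupLoop, ← List.map_set, hpSiftdown_map]
  | succ n ih =>
    intro pos heap
    simp only [hpSiftupLoop, List.getElem?_map]
    by_cases h1 : 2 * pos + 1 < endpos
    · simp only [h1, if_true]
      cases hc : heap[2 * pos + 1]? with
      | none => simp
      | some c =>
        simp only [Option.map_some]
        by_cases h2 : 2 * pos + 2 < endpos
        · simp only [h2, if_true]
          cases hr : heap[2 * pos + 2]? with
          | none => simp [← List.map_set, ih]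
          | some r =>
            have : hpLt (emap g c) (emap g r) = hpLt c r := rfl
            simp only [Option.map_some, this]
            by_cases hlt : !(hpLt c r) <;> simp [hlt, ← List.map_set, ih]
        · simp [h2, ← List.map_set, ih]
    · simp [h1, ← List.map_set, hpSiftdown_map]

theorem hpSiftup_map {α β : Type} (g : α → β) (heap : List (Int × Int × α)) (pos : Nat) :
    hpSiftup (heap.map (emap g)) pos = (hpSiftup heap pos).map (emap g) := by
  simp only [hpSiftup, List.getElem?_map, List.length_map]
  cases h : heap[pos]? with
  | none => simp
  | some ni => simp [hpSiftupLoop_map]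

theorem hpHeapifyLoop_map {α β : Type} (g : α → β) :
    ∀ (n : Nat) (heap : List (Int × Int × α)),
      hpHeapifyLoop n (heap.map (emap g)) = (hpHeapifyLoop n heap).map (emap g) := by
  intro n
  induction n with
  | zero => intro heap; rfl
  | succ i ih => intro heap; simp only [hpHeapifyLoop]; rw [hpSiftup_map, ih]

theorem hpHeapify_map {α β : Type} (g : α → β) (heap : List (Int × Int × α)) :
    hpHeapify (heap.map (emap g)) = (hpHeapify heap).map (emap g) := by
  simp [hpHeapify, List.length_map, hpHeapifyLoop_map]

theorem hpPush_map {α β : Type} (g : α → β) (heap : List (Int × Int × α))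
    (item : Int × Int × α) :
    hpPush (heap.map (emap g)) (emap g item) = (hpPush heap item).map (emap g) := by
  unfold hpPush
  rw [show [emap g item] = [item].map (emap g) from rfl, ← List.map_append, List.length_map,
    hpSiftdown_map]

theorem hpPop_map {α β : Type} (g : α → β) (heap : List (Int × Int × α)) :
    hpPop (heap.map (emap g)) =
      (hpPop heap).map (fun r => (emap g r.1, r.2.map (emap g))) := by
  simp only [hpPop, List.getLast?_map]
  cases h : heap.getLast? with
  | none => simp
  | some lastelt =>
    simp only [Option.map_some]
    rw [← List.map_dropLast]
    cases hd : heap.dropLast with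
    | nil => simp
    | cons r0 rest =>
      simp only [List.map_cons, Option.map_some]
      have : (emap g r0 :: rest.map (emap g)).set 0 (emap g lastelt) =
          ((r0 :: rest).set 0 lastelt).map (emap g) := by simp [List.map_set]
      rw [this, hpSiftup_map]

theorem hMerge_map :
    ∀ (fuel : Nat) (counter : Int) (heap : List (Int × Int × TNode)),
      hBMerge fuel counter (heap.map (emap rawEntries)) =
        (hAMerge fuel counter heap).map (emap rawEntries) := by
  intro fuel
  induction fuel with
  | zero => intro counter heap; rfl
  | succ n ih =>
    intro counter heap
    simp only [hBMerge, hAMerge, List.length_map, hpPop_map]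
    by_cases h1 : heap.length > 1
    · simp only [h1, if_true]
      cases hp0 : hpPop heap with
      | none => simp
      | some p0 =>
        obtain ⟨c0, h1'⟩ := p0
        simp only [Option.map_some, hpPop_map]
        cases hp1 : hpPop h1' with
        | none => simp
        | some p1 =>
          obtain ⟨c1, h2'⟩ := p1
          simp only [Option.map_some]
          by_cases h3 : 3 ≤ heap.length
          · simp only [h3, if_true, hpPop_map]
            cases hp2 : hpPop h2' with
            | none => simp
            | some p2 =>
              obtain ⟨c2, h3'⟩ := p2
              simp only [Option.map_some]
              rw [show ((emap rawEntries c0).1 + (emap rawEntries c1).1 + (emap rawEntries c2).1,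
                    counter,
                    (emap rawEntries c0).2.2.map (fun p => (p.1, '0' :: p.2)) ++
                    (emap rawEntries c1).2.2.map (fun p => (p.1, '1' :: p.2)) ++
                    (emap rawEntries c2).2.2.map (fun p => (p.1, '2' :: p.2))) =
                  emap rawEntries (c0.1 + c1.1 + c2.1, counter,
                    TNode.node3 (c0.1 + c1.1 + c2.1) c0.2.2 c1.2.2 c2.2.2) from rfl]
              rw [hpPush_map, ih]
          · simp only [h3, if_false]
            rw [show ((emap rawEntries c0).1 + (emap rawEntries c1).1, counter,
                  (emap rawEntries c0).2.2.map (fun p => (p.1, '0' :: p.2)) ++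
                  (emap rawEntries c1).2.2.map (fun p => (p.1, '1' :: p.2))) =
                emap rawEntries (c0.1 + c1.1, counter,
                  TNode.node2 (c0.1 + c1.1) c0.2.2 c1.2.2) from rfl]
            rw [hpPush_map, ih]
    · simp [h1]

-- the per-pair insertion build_codes performs at prefix `code`
def fbF (code : List Char) :
    PySem.Dict String String → String × List Char → PySem.Dict String String :=
  fun d p => d.insert p.1 (String.ofList (if code ++ p.2 = [] then ['0'] else code ++ p.2))

theorem fbF_pre (digit : Char) (code : List Char) (l : List (String × List Char))
    (d : PySem.Dict String String) :
    (l.map (fun p => (p.1, digit :: p.2))).foldl (fbF code) d =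
      l.foldl (fbF (code ++ [digit])) d := by
  rw [List.foldl_map]
  apply List.foldl_ext
  intro d p _
  simp [fbF]

-- build_codes emits exactly the rawEntries pairs, prefixed with the current code, with the
-- empty-code → "0" fallback applied per inserted pair
theorem buildCodes_eq :
    ∀ (node : TNode) (codes : PySem.Dict String String) (code : List Char),
      buildCodes codes node code = (rawEntries node).foldl (fbF code) codes := by
  intro node
  induction node with
  | leaf oc f =>
    intro codes code
    cases oc with
    | none => rfl
    | some c => simp [buildCodes, rawEntries, fbF]
  | node2 f a b iha ihb =>
    intro codes code
    simp only [buildCodes, rawEntries, iha, ihb]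
    rw [List.foldl_append, fbF_pre, fbF_pre]
  | node3 f a b c iha ihb ihc =>
    intro codes code
    simp only [buildCodes, rawEntries, iha, ihb, ihc]
    rw [List.foldl_append, List.foldl_append, fbF_pre, fbF_pre, fbF_pre]

theorem enumerate_map {α β : Type} (f : α → β) (l : List α) :
    ∀ s : Int, PySem.List.enumerate (l.map f) s =
      (PySem.List.enumerate l s).map (fun p => (p.1, f p.2)) := by
  induction l with
  | nil => intro s; simp
  | cons x xs ih => intro s; simp [PySem.List.enumerate_cons, ih]


theorem hpSiftdownLoop_length {α : Type} (startpos : Nat) (ni : Int × Int × α) :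
    ∀ (fuel pos : Nat) (heap : List (Int × Int × α)),
      (hpSiftdownLoop startpos ni fuel pos heap).length = heap.length := by
  intro fuel
  induction fuel with
  | zero => intro pos heap; simp [hpSiftdownLoop]
  | succ n ih =>
    intro pos heap
    by_cases hsp : startpos < pos
    · simp only [hpSiftdownLoop, hsp, if_true]
      cases h : heap[(pos - 1) / 2]? with
      | none => simp
      | some parent =>
        by_cases h2 : hpLt ni parent <;> simp [h2, ih]
    · simp [hpSiftdownLoop, hsp]

theorem hpSiftdown_length {α : Type} (heap : List (Int × Int × α)) (startpos pos : Nat) :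
    (hpSiftdown heap startpos pos).length = heap.length := by
  unfold hpSiftdown
  cases h : heap[pos]? with
  | none => rfl
  | some ni => simp [hpSiftdownLoop_length]

theorem hpSiftupLoop_length {α : Type} (endpos startpos : Nat) (ni : Int × Int × α) :
    ∀ (fuel pos : Nat) (heap : List (Int × Int × α)),
      (hpSiftupLoop endpos startpos ni fuel pos heap).length = heap.length := by
  intro fuel
  induction fuel with
  | zero => intro pos heap; simp [hpSiftupLoop, hpSiftdown_length]
  | succ n ih =>
    intro pos heap
    by_cases h1 : 2 * pos + 1 < endpos
    · simp only [hpSiftupLoop, h1, if_true]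
      cases hc : heap[2 * pos + 1]? with
      | none => rfl
      | some c => simp [ih]
    · simp [hpSiftupLoop, h1, hpSiftdown_length]

theorem hpSiftup_length {α : Type} (heap : List (Int × Int × α)) (pos : Nat) :
    (hpSiftup heap pos).length = heap.length := by
  unfold hpSiftup
  cases h : heap[pos]? with
  | none => rfl
  | some ni => simp [hpSiftupLoop_length]

theorem hpHeapifyLoop_length {α : Type} :
    ∀ (n : Nat) (heap : List (Int × Int × α)),
      (hpHeapifyLoop n heap).length = heap.length := by
  intro n
  induction n with
  | zero => intro heap; rfl
  | succ i ih => intro heap; simp [hpHeapifyLoop, ih, hpSiftup_length]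

theorem hpHeapify_length {α : Type} (heap : List (Int × Int × α)) :
    (hpHeapify heap).length = heap.length := by
  simp [hpHeapify, hpHeapifyLoop_length]

theorem finish_map (hA : List (Int × Int × TNode)) :
    bFinish (hA.map (emap rawEntries)) = aFinish hA := by
  cases hA with
  | nil => rfl
  | cons e t =>
    simp only [List.map_cons, bFinish, aFinish]
    rw [buildCodes_eq]
    rfl

-- ===== VERDICT (by name: the statement is the Claim_ definition above) =====
theorem ternary_huffman_spec : Claim_equal_ternary_huffman := by
  intro frequencies _
  unfold Spec_ternary_huffman ternary_huffman ternary_huffman_alt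
  simp only [List.length_map, PySem.List.length_enumerate]
  by_cases hpad : (PySem.Int.mod ((frequencies.length : Int) - 1) 2 != 0) = true
  · simp only [hpad, if_true]
    have hmap :
        (List.map (fun p => (p.2.2, p.1, [(p.2.1, ([] : List Char))]))
            (PySem.List.enumerate frequencies) ++ [(0, (frequencies.length : Int), [])]) =
        ((PySem.List.enumerate
            ((frequencies.map (fun cf => TNode.leaf (some cf.1) cf.2)) ++ [TNode.leaf none 0])).map
          (fun p => (tnFreq p.2, p.1, p.2))).map (emap rawEntries) := by
      rw [PySem.List.enumerate_append]
      simp only [List.map_append, List.map_map]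
      congr 1
      · rw [enumerate_map]
        simp only [List.map_map]
        apply List.map_congr_left
        intro p _
        rfl
      · simp [PySem.List.enumerate, emap, rawEntries, tnFreq]
    rw [hmap, hpHeapify_map, hMerge_map, finish_map, List.length_map, hpHeapify_length]
    congr 1
    simp
  · simp only [hpad, Bool.false_eq_true, if_false]
    have hmap :
        List.map (fun p => (p.2.2, p.1, [(p.2.1, ([] : List Char))]))
            (PySem.List.enumerate frequencies) =
        ((PySem.List.enumerate (frequencies.map (fun cf => TNode.leaf (some cf.1) cf.2))).map
          (fun p => (tnFreq p.2, p.1, p.2))).map (emap rawEntries) := by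
      rw [enumerate_map]
      simp only [List.map_map]
      apply List.map_congr_left
      intro p _
      rfl
    rw [hmap, hpHeapify_map, hMerge_map, finish_map, List.length_map, hpHeapify_length]
    congr 1
    simp
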